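-- pv_equiv track=rewrite | github.com/jkweg/ASD | Exams, tests, etc./23-24/kunlucky.py | kunlucky
-- ===== SOURCE A (Python) =====
-- def kunlucky(T, k):
--   n = len(T)
--   kset = set()
--   kset.add(k)
--
--   x1 = k
--   i = 0
--   maxi = max(T) + 1
--   while x1 < maxi:
--     i+= 1
--     x1 = x1 + (x1%i)+7
--     kset.add(x1)
--
--   maxi = -1
--   for i in range(n):
--     kcnt = 0
--     cnt = 0
--     for j in range(i,n):
--       if T[j] in kset:
--         kcnt += 1
--       if kcnt > 2:
--         break
--       cnt += 1
--       maxi = max(maxi,cnt)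
--
--   return maxi
-- ===== SOURCE B (Python) =====
-- def kunlucky(T, k):
--     # build the set of "unlucky" numbers, same generation rule
--     kset = {k}
--     x1 = k
--     i = 0
--     bound = max(T) + 1
--     while x1 < bound:
--         i += 1
--         x1 = x1 + (x1 % i) + 7
--         kset.add(x1)
--
--     n = len(T)
--     # positions of unlucky elements, in order
--     pos = [j for j, v in enumerate(T) if v in kset]
--     m = len(pos)
--     best = 0
--     c = 0  # index of the first unlucky position >= i
--     for i in range(n):
--         if c < m and pos[c] < i:
--             c += 1
--         end = pos[c + 2] if c + 2 < m else n
--         best = max(best, end - i)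
--     return best
-- ===== Notes on version B (the rewrite author's own statement) =====
-- stated objective: faster
-- what changed: B replaces A's quadratic restart-scan (for each start index, rescan forward until a third unlucky element) by a single pass: it precomputes the ordered list of unlucky positions once and, for each start i, obtains the window end directly as the third unlucky position >= i via an incrementally advanced pointer.
import Mathlib
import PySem

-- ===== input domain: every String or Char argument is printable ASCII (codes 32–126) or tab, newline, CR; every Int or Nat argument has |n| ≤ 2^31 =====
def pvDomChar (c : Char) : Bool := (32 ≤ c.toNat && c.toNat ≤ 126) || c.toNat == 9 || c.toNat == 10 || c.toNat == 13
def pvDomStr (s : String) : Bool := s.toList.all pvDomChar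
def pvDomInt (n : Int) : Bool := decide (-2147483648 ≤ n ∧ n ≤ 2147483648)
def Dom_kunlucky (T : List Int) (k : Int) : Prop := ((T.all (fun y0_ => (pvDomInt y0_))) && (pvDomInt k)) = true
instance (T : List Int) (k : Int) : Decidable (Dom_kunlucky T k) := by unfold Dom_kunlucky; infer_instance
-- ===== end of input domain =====

-- B replaces A's quadratic per-start rescan by one pass over precomputed unlucky positions; equivalence proved for nonempty T (A raises on []).

-- ===== PORT A =====
-- the 'while x1 < maxi' generation loop (this loop appears verbatim in both Pythons); x1 grows by at least 7 each step.
-- kset.add(x1) is kept as an O(1) prepend: the set is consumed ONLY through membership tests afterwards,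
-- for which a plain element list is exact (x1 strictly increases, so no duplicate ever arises anyway).
def ksetLoop (maxi : Int) (x1 : Int) (i : Int) (s : List Int) (hi : 0 ≤ i) : List Int :=
  if _h : x1 < maxi then
    ksetLoop maxi (x1 + PySem.Int.mod x1 (i + 1) + 7) (i + 1)
      ((x1 + PySem.Int.mod x1 (i + 1) + 7) :: s) (by omega)
  else s
termination_by (maxi - x1).toNat
decreasing_by
  have hm : 0 ≤ PySem.Int.mod x1 (i + 1) := PySem.Int.mod_nonneg x1 (by omega)
  omega

-- kset = set(); kset.add(k); maxi = max(T)+1; while …  (shared verbatim by A and B)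
def buildKset (T : List Int) (k : Int) : List Int :=
  ksetLoop (((PySem.List.max? T (fun x => x)).getD 0) + 1) k 0
    (PySem.Set.add PySem.Set.empty k) (le_refl 0)

-- the inner 'for j in range(i, n): … break' loop of A, over the list of remaining j's
def innerA (S : PySem.Set Int) (T : List Int) : List Int → Int → Int → Int → Int
  | [], _, _, maxi => maxi
  | j :: js, kcnt, cnt, maxi =>
    let kcnt' := if PySem.Set.contains S (PySem.List.pyGetD T j 0) then kcnt + 1 else kcnt
    if kcnt' > 2 then maxi
    else innerA S T js kcnt' (cnt + 1) (max maxi (cnt + 1))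

def kunlucky (T : List Int) (k : Int) : Int :=
  let n : Int := PySem.List.len T
  let kset := buildKset T k
  (PySem.List.pyRange 0 n 1).foldl
    (fun maxi i => innerA kset T (PySem.List.pyRange i n 1) 0 0 maxi) (-1)

-- ===== PORT B =====
def kunlucky_alt (T : List Int) (k : Int) : Int :=
  let kset := buildKset T k
  let n : Int := PySem.List.len T
  let pos : List Int := (PySem.List.enumerate T 0).filterMap
    (fun jv => if PySem.Set.contains kset jv.2 then some jv.1 else none)
  let m : Int := PySem.List.len pos
  ((PySem.List.pyRange 0 n 1).foldl
    (fun (st : Int × Int) i =>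
      let c := if st.1 < m ∧ PySem.List.pyGetD pos st.1 0 < i then st.1 + 1 else st.1
      let e := if c + 2 < m then PySem.List.pyGetD pos (c + 2) 0 else n
      (c, max st.2 (e - i))) ((0 : Int), (0 : Int))).2

-- ===== PRECONDITION & SPEC =====
-- Pre_ excludes only the empty list, on which A raises ValueError at max(T).
def Pre_kunlucky (T : List Int) (k : Int) : Prop := T ≠ []
instance (T : List Int) (k : Int) : Decidable (Pre_kunlucky T k) := by unfold Pre_kunlucky; infer_instance
def pvWitness_kunlucky : List Int × Int := ([3], 2)

def Spec_kunlucky (T : List Int) (k : Int) (out : Int) : Prop := out = kunlucky_alt T k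
instance (T : List Int) (k : Int) (out : Int) : Decidable (Spec_kunlucky T k out) := by unfold Spec_kunlucky; infer_instance

-- ===== CLAIM (what is proved, stated in full; the proofs are below) =====
def Claim_equal_kunlucky : Prop := ∀ (T : List Int) (k : Int), Dom_kunlucky T k → Pre_kunlucky T k → Spec_kunlucky T k (kunlucky T k)

-- ===== LEMMAS AND PROOFS =====

-- A's inner loop, rephrased on the list of booleans "T[j] is unlucky"
def innerL : List Bool → Int → Int → Int → Int
  | [], _, _, maxi => maxi
  | b :: L, kcnt, cnt, maxi =>
    let kcnt' := if b then kcnt + 1 else kcnt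
    if kcnt' > 2 then maxi
    else innerL L kcnt' (cnt + 1) (max maxi (cnt + 1))

-- length of the longest prefix with at most r 'true's
def reach : List Bool → Nat → Nat
  | [], _ => 0
  | b :: L, r => if b then (if r = 0 then 0 else 1 + reach L (r - 1)) else 1 + reach L r

-- positions of the 'true's
def trues : List Bool → List Nat
  | [] => []
  | b :: L => if b then 0 :: (trues L).map (· + 1) else (trues L).map (· + 1)

def marks (S : PySem.Set Int) (T : List Int) : List Bool := T.map (PySem.Set.contains S)
def posOf (S : PySem.Set Int) (T : List Int) : List Int := (trues (marks S T)).map (fun x : Nat => (x : Int))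
def valB (S : PySem.Set Int) (T : List Int) (t : Nat) : Int := ((reach ((marks S T).drop t) 2 : Nat) : Int)

theorem innerL_eq_reach :
    ∀ (L : List Bool) (r : Nat) (kcnt cnt maxi : Int), kcnt + (r : Int) = 2 →
      innerL L kcnt cnt maxi
        = if reach L r = 0 then maxi else max maxi (cnt + (reach L r : Int)) := by
  intro L
  induction L with
  | nil => intro r kcnt cnt maxi _; simp [innerL, reach]
  | cons b L ih =>
    intro r kcnt cnt maxi hk
    by_cases hb : b
    · subst hb
      by_cases hr : r = 0
      · subst hr
        simp only [innerL, reach, if_true]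
        rw [if_pos (by omega)]
      · have h1 : 1 ≤ r := Nat.one_le_iff_ne_zero.mpr hr
        simp only [innerL, reach, if_true]
        rw [if_neg (by omega), if_neg hr, ih (r - 1) (kcnt + 1) (cnt + 1) (max maxi (cnt + 1))
          (by push_cast [h1]; omega)]
        rw [if_neg (by omega : ¬(1 + reach L (r - 1) = 0))]
        by_cases h0 : reach L (r - 1) = 0
        · rw [if_pos h0, h0]; push_cast; omega
        · rw [if_neg h0]; push_cast; omega
    · simp only [Bool.not_eq_true] at hb; subst hb
      simp only [innerL, reach, Bool.false_eq_true, if_false]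
      rw [if_neg (by omega), ih r kcnt (cnt + 1) (max maxi (cnt + 1)) hk]
      rw [if_neg (by omega : ¬(1 + reach L r = 0))]
      by_cases h0 : reach L r = 0
      · rw [if_pos h0, h0]; push_cast; omega
      · rw [if_neg h0]; push_cast; omega

theorem reach_pos (L : List Bool) (h : L ≠ []) (r : Nat) (hr : r ≠ 0) : 1 ≤ reach L r := by
  cases L with
  | nil => exact absurd rfl h
  | cons b L => cases b <;> simp [reach, hr] <;> omega

theorem reach_eq_trues (L : List Bool) : ∀ r, reach L r = ((trues L)[r]?).getD L.length := by
  induction L with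
  | nil => intro r; simp [reach, trues]
  | cons b L ih =>
    intro r
    cases b
    · simp only [reach, trues, Bool.false_eq_true, if_false]
      rw [List.getElem?_map, ih r]
      cases h : (trues L)[r]? <;> simp [h] <;> omega
    · simp only [reach, trues, if_true]
      cases r with
      | zero => simp
      | succ r' =>
        simp only [Nat.succ_ne_zero, if_neg, List.getElem?_cons_succ, Nat.add_sub_cancel]
        rw [List.getElem?_map, ih r']
        cases h : (trues L)[r']? <;> simp [h] <;> omega

theorem trues_pairwise (L : List Bool) : (trues L).Pairwise (· < ·) := by
  induction L with
  | nil => simp [trues]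
  | cons b L ih =>
    cases b <;> simp only [trues, Bool.false_eq_true, if_false, if_true]
    · exact ih.map _ (by omega)
    · refine List.Pairwise.cons ?_ (ih.map _ (by omega))
      intro x hx
      obtain ⟨y, _, rfl⟩ := List.mem_map.mp hx
      omega

theorem trues_drop (L : List Bool) :
    ∀ t, trues (L.drop t) = ((trues L).filter (fun x => t ≤ x)).map (fun x => x - t) := by
  induction L with
  | nil => intro t; simp [trues]
  | cons b L ih =>
    intro t
    cases t with
    | zero =>
      rw [List.drop_zero, List.filter_eq_self.mpr (by intro a _; simp), List.map_id'']
      · intro a; simp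
    | succ t =>
      rw [List.drop_succ_cons, ih t]
      have key : ∀ (P : List Nat), List.map (fun x => x - t) (P.filter (fun x => decide (t ≤ x)))
          = List.map (fun x => x - (t + 1)) ((P.map (fun x => x + 1)).filter (fun x => decide (t + 1 ≤ x))) := by
        intro P
        rw [List.filter_map, List.map_map]
        simp only [Function.comp_def]
        rw [List.filter_congr (fun x _ => by simp : ∀ x ∈ P, (decide (t + 1 ≤ x + 1)) = decide (t ≤ x))]
        exact (List.map_congr_left (fun x _ => by omega)).symm
      cases b
      · simp only [trues, Bool.false_eq_true, if_false]
        exact key (trues L)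
      · simp only [trues, if_true]
        rw [List.filter_cons_of_neg (by simp)]
        exact key (trues L)

theorem pos_eq_trues (S : PySem.Set Int) (T : List Int) : ∀ (s : Int),
    (PySem.List.enumerate T s).filterMap
        (fun jv => if PySem.Set.contains S jv.2 then some jv.1 else none)
      = (trues (T.map (PySem.Set.contains S))).map (fun x : Nat => s + (x : Int)) := by
  induction T with
  | nil => intro s; simp [PySem.List.enumerate, trues]
  | cons x xs ih =>
    intro s
    rw [PySem.List.enumerate_cons, List.filterMap_cons, ih (s + 1)]
    cases h : PySem.Set.contains S x <;> simp only [List.map_cons, trues, h, Bool.false_eq_true,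
      if_false, if_true]
    · rw [List.map_map]
      apply List.map_congr_left; intro y _; simp; omega
    · rw [List.map_map]
      congr 1
      · simp
      · apply List.map_congr_left; intro y _; simp; omega

theorem countP_lt_sorted (j : Int) :
    ∀ (l : List Int), l.Pairwise (· < ·) →
      ∀ (i : Nat) (h : i < l.length),
        (i < l.countP (fun p => decide (p < j)) ↔ l[i] < j) := by
  intro l
  induction l with
  | nil => intro _ i h; simp at h
  | cons a rest ih =>
    intro hs i h
    have hrest := (List.pairwise_cons.mp hs).2
    have hmem := (List.pairwise_cons.mp hs).1
    by_cases ha : a < j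
    · rw [List.countP_cons, if_pos (by simpa using ha)]
      cases i with
      | zero => simpa using ha
      | succ i =>
        simp only [List.getElem_cons_succ]
        rw [← ih hrest i (by simpa using h)]
        omega
    · have h0 : rest.countP (fun p => decide (p < j)) = 0 := by
        rw [List.countP_eq_zero]
        intro p hp
        have := hmem p hp
        simp; omega
      rw [List.countP_cons, if_neg (by simpa using ha), h0]
      cases i with
      | zero => simpa using ha
      | succ i =>
        simp only [List.getElem_cons_succ]
        have hi : i < rest.length := by simpa using h
        have := hmem (rest[i]'hi) (List.getElem_mem hi)
        constructor
        · omega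
        · intro hlt; omega

theorem countP_lt_succ (j : Int) (l : List Int) :
    l.countP (fun p => decide (p < j)) = l.countP (fun p => decide (p < j - 1)) + l.count (j - 1) := by
  induction l with
  | nil => simp
  | cons a rest ih =>
    rw [List.countP_cons, List.countP_cons, List.count_cons, ih]
    by_cases h1 : a < j - 1 <;> by_cases h2 : a = j - 1 <;>
      simp only [h1, h2, decide_true, decide_false, if_true, if_false, beq_iff_eq, reduceIte] <;>
      (split_ifs <;> simp_all <;> omega)

theorem filter_le_eq_drop_countP (t : Nat) :
    ∀ (P : List Nat), P.Pairwise (· < ·) →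
      P.filter (fun x => t ≤ x) = P.drop (P.countP (fun x => decide (x < t))) := by
  intro P
  induction P with
  | nil => simp
  | cons a rest ih =>
    intro hs
    have hrest := (List.pairwise_cons.mp hs).2
    have hmem := (List.pairwise_cons.mp hs).1
    by_cases ha : a < t
    · rw [List.filter_cons_of_neg (by simpa using (by omega : ¬ t ≤ a)), List.countP_cons,
        if_pos (by simpa using ha)]
      rw [ih hrest]
      simp
    · have h0 : rest.countP (fun x => decide (x < t)) = 0 := by
        rw [List.countP_eq_zero]
        intro p hp
        have := hmem p hp
        simp; omega
      rw [List.filter_cons_of_pos (by simpa using (by omega : t ≤ a)), List.countP_cons,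
        if_neg (by simpa using ha), h0, List.drop_zero]
      congr 1
      rw [List.filter_eq_self]
      intro p hp
      have := hmem p hp
      simp; omega

theorem innerA_eq_innerL (S : PySem.Set Int) (T : List Int) :
    ∀ (d t : Nat), T.length - t = d → ∀ kcnt cnt maxi,
      innerA S T (PySem.List.pyRange (t : Int) (PySem.List.len T) 1) kcnt cnt maxi
        = innerL ((marks S T).drop t) kcnt cnt maxi := by
  intro d
  induction d with
  | zero =>
    intro t ht kcnt cnt maxi
    rw [PySem.List.pyRange_one_eq_nil (by simp [PySem.List.len_eq]; omega),
      List.drop_eq_nil_of_le (by simp [marks]; omega)]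
    rfl
  | succ d ih =>
    intro t ht kcnt cnt maxi
    have hlt : t < T.length := by omega
    rw [PySem.List.pyRange_one_cons (by simp [PySem.List.len_eq]; omega)]
    have hdrop : (marks S T).drop t = (marks S T)[t]'(by simp [marks]; omega) :: (marks S T).drop (t + 1) :=
      List.drop_eq_getElem_cons (by simp [marks]; omega)
    rw [hdrop]
    simp only [innerA, innerL]
    have hget : PySem.List.pyGetD T (t : Int) 0 = T[t]'hlt := by
      rw [PySem.List.pyGetD_natCast, List.getD_eq_getElem _ _ hlt]
    have hb : (marks S T)[t]'(by simp [marks]; omega) = PySem.Set.contains S (T[t]'hlt) := by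
      simp [marks]
    rw [hget, hb]
    by_cases hc : PySem.Set.contains S (T[t]'hlt)
    · simp only [hc, if_true]
      by_cases h2 : kcnt + 1 > 2
      · rw [if_pos h2, if_pos h2]
      · rw [if_neg h2, if_neg h2]
        have : ((t : Int) + 1) = ((t + 1 : Nat) : Int) := by push_cast; ring
        rw [this, ih (t + 1) (by omega)]
    · simp only [hc, Bool.false_eq_true, if_false]
      by_cases h2 : kcnt > 2
      · rw [if_pos h2, if_pos h2]
      · rw [if_neg h2, if_neg h2]
        have : ((t : Int) + 1) = ((t + 1 : Nat) : Int) := by push_cast; ring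
        rw [this, ih (t + 1) (by omega)]

theorem posOf_pairwise (S : PySem.Set Int) (T : List Int) : (posOf S T).Pairwise (· < ·) :=
  (trues_pairwise (marks S T)).map _ (by intro a b h; exact_mod_cast h)

theorem posOf_nonneg (S : PySem.Set Int) (T : List Int) : ∀ p ∈ posOf S T, 0 ≤ p := by
  intro p hp
  obtain ⟨x, _, rfl⟩ := List.mem_map.mp hp
  positivity

theorem countP_posOf (S : PySem.Set Int) (T : List Int) (t : Nat) :
    (posOf S T).countP (fun p => decide (p < (t : Int)))
      = (trues (marks S T)).countP (fun x => decide (x < t)) := by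
  unfold posOf
  rw [List.countP_map]
  apply List.countP_congr
  intro x _
  simp

theorem bstep_c (S : PySem.Set Int) (T : List Int) (t : Nat) (c : Nat)
    (hc : (c : Int) = ((posOf S T).countP (fun p => decide (p < (t : Int) - 1)) : Nat)) :
    (if (c : Int) < PySem.List.len (posOf S T) ∧ PySem.List.pyGetD (posOf S T) (c : Int) 0 < (t : Int)
      then (c : Int) + 1 else (c : Int))
      = ((posOf S T).countP (fun p => decide (p < (t : Int))) : Nat) := by
  have hs := posOf_pairwise S T
  have hnd : (posOf S T).Nodup := hs.imp (fun h => ne_of_lt h)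
  have hcn : c = (posOf S T).countP (fun p => decide (p < (t : Int) - 1)) := by exact_mod_cast hc
  have hsucc := countP_lt_succ (t : Int) (posOf S T)
  have hlen := List.countP_le_length (p := fun p => decide (p < (t : Int))) (l := posOf S T)
  by_cases hm : ((t : Int) - 1) ∈ posOf S T
  · have hcount : (posOf S T).count ((t : Int) - 1) = 1 := List.count_eq_one_of_mem hnd hm
    have heq : (posOf S T).countP (fun p => decide (p < (t : Int))) = c + 1 := by omega
    have hclen : c < (posOf S T).length := by omega
    have h2 : (posOf S T)[c] < (t : Int) := by
      rw [← countP_lt_sorted (t : Int) (posOf S T) hs c hclen]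
      omega
    rw [if_pos ⟨by rw [PySem.List.len_eq]; exact_mod_cast hclen,
      by rw [PySem.List.pyGetD_natCast, List.getD_eq_getElem _ _ hclen]; exact h2⟩]
    rw [heq]
    push_cast
    ring
  · have hcount : (posOf S T).count ((t : Int) - 1) = 0 := List.count_eq_zero_of_not_mem hm
    have heq : (posOf S T).countP (fun p => decide (p < (t : Int))) = c := by omega
    rw [if_neg, heq]
    rintro ⟨h1, h2⟩
    rw [PySem.List.len_eq] at h1
    have hclen : c < (posOf S T).length := by exact_mod_cast h1
    rw [PySem.List.pyGetD_natCast, List.getD_eq_getElem _ _ hclen] at h2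
    have h3 : ¬ (posOf S T)[c] < (t : Int) := by
      rw [← countP_lt_sorted (t : Int) (posOf S T) hs c hclen]
      omega
    exact h3 h2

theorem bstep_e (S : PySem.Set Int) (T : List Int) (t : Nat) (ht : t < T.length) (c : Nat)
    (hc : c = (posOf S T).countP (fun p => decide (p < (t : Int)))) :
    (if (c : Int) + 2 < PySem.List.len (posOf S T)
      then PySem.List.pyGetD (posOf S T) ((c : Int) + 2) 0 else PySem.List.len T) - (t : Int)
      = valB S T t := by
  have hmlen : (marks S T).length = T.length := by simp [marks]
  have hplen : (posOf S T).length = (trues (marks S T)).length := by simp [posOf]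
  have hcP : c = (trues (marks S T)).countP (fun x => decide (x < t)) := by
    rw [hc, countP_posOf]
  have hval : valB S T t
      = (((trues (marks S T)).drop c)[2]?.map (fun x : Nat => x - t)).getD (T.length - t) := by
    unfold valB
    rw [reach_eq_trues, trues_drop, filter_le_eq_drop_countP t _ (trues_pairwise _), ← hcP,
      List.getElem?_map, List.length_drop, hmlen]
  rw [hval]
  have hdix : ((trues (marks S T)).drop c)[2]? = (trues (marks S T))[c + 2]? := List.getElem?_drop
  by_cases h2 : c + 2 < (trues (marks S T)).length
  · have hsome : (trues (marks S T))[c + 2]? = some ((trues (marks S T))[c + 2]'h2) :=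
      List.getElem?_eq_getElem h2
    have hd2 : 2 < ((trues (marks S T)).drop c).length := by rw [List.length_drop]; omega
    have hmemd : (trues (marks S T))[c + 2]'h2 ∈ (trues (marks S T)).drop c := by
      have hmm := List.getElem_mem hd2
      rwa [List.getElem_drop] at hmm
    have htle : t ≤ (trues (marks S T))[c + 2]'h2 := by
      have := filter_le_eq_drop_countP t (trues (marks S T)) (trues_pairwise _)
      rw [← hcP] at this
      rw [← this] at hmemd
      have := List.of_mem_filter hmemd
      simpa using this
    rw [if_pos (by rw [PySem.List.len_eq]; push_cast; omega)]
    have : ((c : Int) + 2) = ((c + 2 : Nat) : Int) := by push_cast; ring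
    rw [this, PySem.List.pyGetD_natCast, List.getD_eq_getElem _ _ (by omega : c + 2 < (posOf S T).length)]
    have hgp : (posOf S T)[c + 2]'(by omega) = (((trues (marks S T))[c + 2]'h2 : Nat) : Int) := by
      unfold posOf
      rw [List.getElem_map]
    rw [hgp, hdix, hsome]
    simp only [Option.map_some, Option.getD_some]
    push_cast [htle]
    ring
  · have hnone : (trues (marks S T))[c + 2]? = none := List.getElem?_eq_none (by omega)
    rw [if_neg (by rw [PySem.List.len_eq]; push_cast; omega), hdix, hnone]
    simp only [Option.map_none, Option.getD_none]
    rw [PySem.List.len_eq]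
    push_cast [le_of_lt ht]
    ring

theorem bfold (S : PySem.Set Int) (T : List Int) :
    ∀ (d t : Nat), T.length - t = d → ∀ (c : Nat) (best : Int),
      (c : Int) = ((posOf S T).countP (fun p => decide (p < (t : Int) - 1)) : Nat) →
      ((PySem.List.pyRange (t : Int) (PySem.List.len T) 1).foldl
        (fun (st : Int × Int) i =>
          let c := if st.1 < PySem.List.len (posOf S T) ∧ PySem.List.pyGetD (posOf S T) st.1 0 < i
            then st.1 + 1 else st.1
          let e := if c + 2 < PySem.List.len (posOf S T) then PySem.List.pyGetD (posOf S T) (c + 2) 0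
            else PySem.List.len T
          (c, max st.2 (e - i))) ((c : Int), best)).2
      = (PySem.List.pyRange (t : Int) (PySem.List.len T) 1).foldl
          (fun m i => max m (valB S T i.toNat)) best := by
  intro d
  induction d with
  | zero =>
    intro t ht c best _
    rw [PySem.List.pyRange_one_eq_nil (by simp [PySem.List.len_eq]; omega)]
    rfl
  | succ d ih =>
    intro t ht c best hc
    rw [PySem.List.pyRange_one_cons (by simp [PySem.List.len_eq]; omega), List.foldl_cons,
      List.foldl_cons]
    dsimp only
    rw [bstep_c S T t c hc, bstep_e S T t (by omega)
      ((posOf S T).countP (fun p => decide (p < (t : Int)))) rfl, Int.toNat_natCast]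
    have h1 : ((t : Int) + 1) = ((t + 1 : Nat) : Int) := by push_cast; ring
    rw [h1, ih (t + 1) (by omega) ((posOf S T).countP (fun p => decide (p < (t : Int))))
      (max best (valB S T t))
      (by
        congr 1
        apply List.countP_congr
        intro p _
        constructor <;> (intro h; simp at h ⊢; omega))]

theorem pos_eq_posOf (S : PySem.Set Int) (T : List Int) :
    (PySem.List.enumerate T 0).filterMap
        (fun jv => if PySem.Set.contains S jv.2 then some jv.1 else none) = posOf S T := by
  rw [pos_eq_trues]
  unfold posOf marks
  simp

-- ===== VERDICT (by name: the statement is the Claim_ definition above) =====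
theorem kunlucky_spec : Claim_equal_kunlucky := by
  intro T k _hdom hpre
  unfold Spec_kunlucky kunlucky kunlucky_alt
  simp only []
  rw [pos_eq_posOf (buildKset T k) T]
  set S := buildKset T k with hS
  have hTlen : 0 < T.length := List.length_pos_of_ne_nil hpre
  have hA : ∀ (m i : Int), i ∈ PySem.List.pyRange 0 (PySem.List.len T) 1 →
      innerA S T (PySem.List.pyRange i (PySem.List.len T) 1) 0 0 m = max m (valB S T i.toNat) := by
    intro m i hi
    rw [PySem.List.mem_pyRange_one] at hi
    rw [PySem.List.len_eq] at hi
    have hit : i = ((i.toNat : Nat) : Int) := by omega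
    rw [hit, innerA_eq_innerL S T (T.length - i.toNat) i.toNat rfl,
      innerL_eq_reach _ 2 0 0 m (by norm_num)]
    have hne : (marks S T).drop i.toNat ≠ [] := by
      intro hnil
      have hl := congrArg List.length hnil
      simp only [List.length_drop, List.length_nil, marks, List.length_map] at hl
      omega
    rw [if_neg (by have := reach_pos _ hne 2 (by omega); omega)]
    simp only [zero_add, Int.toNat_natCast, valB]
  rw [PySem.List.foldl_congr_mem _ _ (fun m i => max m (valB S T i.toNat)) _
    (by intro acc x hx; exact hA acc x hx)]
  have hB := bfold S T T.length 0 (by omega) 0 0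
    (by
      symm
      rw [Nat.cast_inj, List.countP_eq_zero]
      intro p hp
      have := posOf_nonneg S T p hp
      simp
      omega)
  rw [Nat.cast_zero] at hB
  rw [hB]
  have hr : PySem.List.pyRange 0 (PySem.List.len T) 1
      = 0 :: PySem.List.pyRange 1 (PySem.List.len T) 1 :=
    PySem.List.pyRange_one_cons (by rw [PySem.List.len_eq]; omega)
  rw [hr, List.foldl_cons, List.foldl_cons]
  have hv0 : 1 ≤ valB S T 0 := by
    unfold valB
    rw [List.drop_zero]
    have := reach_pos (marks S T)
      (by simp only [marks, ne_eq, List.map_eq_nil_iff]; exact hpre) 2 (by omega)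
    omega
  rw [Int.toNat_zero, max_eq_right (by omega), max_eq_right (by omega)]
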